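-- pv_equiv track=rewrite | github.com/olivia-rippee/Python-for-Computational-Biology-and-Bioinformatics | Bioinformatics VI - Finding Mutations in DNA and Proteins/1 Read Mapping.py | ShortestNonSharedSubstring
-- ===== SOURCE A (Python) =====
-- from collections import deque
--
-- class Node:
--     def __init__(self):
--         self.children = {}
--         self.parent = None
--         self.char_from_parent = ''
--         self.depth = 0  # length of substring from root to this node
--
-- def ShortestNonSharedSubstring(text1, text2):
--     '''Find the shortest substring of one string that does not appear in another string.
--
--     Input: Strings Text1 and Text2.
--     Output: The shortest substring of Text1 that does not appear in Text2.
--     Multiple solutions may exist, in which case the function returns one.'''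
--
--     root = BuildSuffixTrie(text1)
--     queue = deque([root])
--
--     while queue:
--         node = queue.popleft()
--         # root corresponds to empty substring, skip it
--         if node != root:
--             substr = GetSubstringFromNode(node)
--             if not SubstringExistsInText(text2, substr):
--                 return substr
--         for child in node.children.values():
--             queue.append(child)
--
--     return ""  # fallback if all substrings appear in text2
--
-- def BuildSuffixTrie(text):
--     root = Node()
--     for i in range(len(text)):
--         current = root
--         for j in range(i, len(text)):
--             c = text[j]
--             if c not in current.children:
--                 new_node = Node()
--                 new_node.parent = current
--                 new_node.char_from_parent = c
--                 new_node.depth = current.depth + 1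
--                 current.children[c] = new_node
--             current = current.children[c]
--     return root
--
-- def SubstringExistsInText(text, substring):
--     # Check if substring occurs in text (simple search)
--     return substring in text
--
-- def GetSubstringFromNode(node):
--     chars = []
--     while node.parent is not None:
--         chars.append(node.char_from_parent)
--         node = node.parent
--     return ''.join(reversed(chars))
-- ===== SOURCE B (Python) =====
-- def ShortestNonSharedSubstring(text1, text2):
--     '''Shortest substring of text1 absent from text2 (same tie-breaking as the
--     trie-BFS version), found level by level over distinct substrings with no trie.'''
--     n = len(text1)
--     level = []
--     for c in text1:
--         if c not in level:
--             level.append(c)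
--     for L in range(1, n + 1):
--         for s in level:
--             if s not in text2:
--                 return s
--         nxt = []
--         for s in level:
--             for a in range(n - L):
--                 if text1[a:a + L] == s:
--                     t = s + text1[a + L]
--                     if t not in nxt:
--                         nxt.append(t)
--         level = nxt
--     return ""
-- ===== Notes on version B (the rewrite author's own statement) =====
-- stated objective: alternative
-- what changed: A materialises a full suffix trie (Node objects with parent pointers and child dicts) and BFS-walks it with a deque, rebuilding each substring by walking parents; B keeps no tree at all and iterates level by level over plain lists of distinct substrings of length L, generating the next level by scanning text1 for occurrences, preserving A's exact breadth-first tie-breaking order.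
import Mathlib
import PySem

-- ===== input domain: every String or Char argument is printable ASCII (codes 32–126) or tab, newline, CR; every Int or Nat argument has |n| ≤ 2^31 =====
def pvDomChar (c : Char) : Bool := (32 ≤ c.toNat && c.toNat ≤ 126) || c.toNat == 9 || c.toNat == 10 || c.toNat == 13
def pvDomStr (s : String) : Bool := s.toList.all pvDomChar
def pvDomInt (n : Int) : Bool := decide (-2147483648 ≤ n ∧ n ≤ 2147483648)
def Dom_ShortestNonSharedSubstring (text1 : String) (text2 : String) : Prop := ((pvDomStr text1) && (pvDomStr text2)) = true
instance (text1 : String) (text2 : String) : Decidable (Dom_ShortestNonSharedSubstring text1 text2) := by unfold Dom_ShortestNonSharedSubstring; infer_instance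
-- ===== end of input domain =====

-- B replaces A's explicit suffix-trie (Node objects, parent pointers, deque BFS) by a
-- level-by-level scan over lists of distinct substrings of growing length: alternative
-- algorithmic structure, same return value on every input.

-- ===== PORT A =====
-- Python objects on the heap are ported as an arena (list of nodes addressed by index);
-- children is the Python dict {char: node}, parent/char_from_parent/depth as in class Node.
structure TNode where
  children : PySem.Dict Char Nat
  parent : Option Nat
  chr : Char
  depth : Nat
deriving DecidableEq, Repr

def defNode : TNode := ⟨PySem.Dict.empty, none, ' ', 0⟩

-- body of the inner `for j in range(i, len(text))` loop of BuildSuffixTrie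
def trieStep (l : List Char) (st : List TNode × Nat) (j : Nat) : List TNode × Nat :=
  let arena := st.1
  let cur := st.2
  let c := l.getD j ' '          -- text[j]; exact: j < len(text) at every call
  let nd := arena.getD cur defNode
  match (PySem.Dict.get? nd.children c) with
  | some u => (arena, u)         -- c in current.children: current = current.children[c]
  | none =>                      -- create new node, link it, descend
    let newId := arena.length
    ((arena.set cur { nd with children := nd.children.insert c newId }) ++
       [⟨PySem.Dict.empty, some cur, c, nd.depth + 1⟩], newId)

def buildSuffixTrie (l : List Char) : List TNode :=
  (List.range l.length).foldl
    (fun arena i => ((List.range' i (l.length - i)).foldl (trieStep l) (arena, 0)).1)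
    [⟨PySem.Dict.empty, none, ' ', 0⟩]   -- root (char_from_parent unused at the root)

-- GetSubstringFromNode: walk parent pointers collecting chars (node-to-root order)
def nodeCharsRev (arena : List TNode) (v : Nat) : List Char :=
  match arena[v]? with
  | none => []
  | some nd =>
    match nd.parent with
    | none => []
    | some p => if _h : p < v then nd.chr :: nodeCharsRev arena p else [nd.chr]
      -- `p < v` holds for every node the trie builder creates (guard for totality)
termination_by v

def getSubstringFromNode (arena : List TNode) (v : Nat) : List Char :=
  (nodeCharsRev arena v).reverse           -- ''.join(reversed(chars))

def substringExistsInText (text sub : List Char) : Bool := PySem.Chars.isIn sub text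

-- the `while queue:` BFS; fuel only makes the recursion total (proved never exhausted)
def bfsA (arena : List TNode) (t2 : List Char) : Nat → List Nat → List Char
  | 0, _ => []
  | _ + 1, [] => []
  | fuel + 1, v :: q =>
    let check : Option (List Char) :=
      if v ≠ 0 then                         -- node != root
        let substr := getSubstringFromNode arena v
        if substringExistsInText t2 substr then none else some substr
      else none
    match check with
    | some s => s
    | none => bfsA arena t2 fuel (q ++ (arena.getD v defNode).children.values)

def ShortestNonSharedSubstring (text1 : String) (text2 : String) : String :=
  let l := text1.toList
  let arena := buildSuffixTrie l
  String.ofList (bfsA arena text2.toList ((l.length + 2) * (arena.length + 1)) [0])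

-- ===== PORT B =====
-- one iteration of B's `for L in range(1, n+1)` loop; state inl = answer returned
def altBody (l t2 : List Char) (st : List Char ⊕ List (List Char)) (L : Nat) :
    List Char ⊕ List (List Char) :=
  match st with
  | .inl s => .inl s
  | .inr level =>
    match level.find? (fun s => !(PySem.Chars.isIn s t2)) with  -- for s in level: if s not in text2: return s
    | some s => .inl s
    | none =>
      let n := l.length
      let nxt := level.foldl (fun nxt s =>
        (List.range (n - L)).foldl (fun nxt a =>
          if (l.drop a).take L = s then                 -- text1[a:a+L] == s (exact: 0 ≤ a ≤ a+L ≤ n)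
            let t := s ++ [l.getD (a + L) ' ']          -- s + text1[a+L]; exact: a+L < n
            if t ∈ nxt then nxt else nxt ++ [t]
          else nxt) nxt) []
      .inr nxt

def ShortestNonSharedSubstring_alt (text1 : String) (text2 : String) : String :=
  let l := text1.toList
  let level0 := l.foldl (fun acc c => if [c] ∈ acc then acc else acc ++ [[c]]) ([] : List (List Char))
  match (List.range' 1 l.length).foldl (altBody l text2.toList) (.inr level0) with
  | .inl s => String.ofList s
  | .inr _ => String.ofList []                 -- fallback: every substring appears in text2

-- ===== PRECONDITION & SPEC =====
def Spec_ShortestNonSharedSubstring (text1 : String) (text2 : String) (out : String) : Prop := out = ShortestNonSharedSubstring_alt text1 text2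
instance (text1 : String) (text2 : String) (out : String) : Decidable (Spec_ShortestNonSharedSubstring text1 text2 out) := by unfold Spec_ShortestNonSharedSubstring; infer_instance

-- ===== CLAIM (what is proved, stated in full; the proofs are below) =====
def Claim_equal_ShortestNonSharedSubstring : Prop := ∀ (text1 : String) (text2 : String), Dom_ShortestNonSharedSubstring text1 text2 → Spec_ShortestNonSharedSubstring text1 text2 (ShortestNonSharedSubstring text1 text2)

-- ===== LEMMAS AND PROOFS =====

-- root-to-node string of a node
def strOf (arena : List TNode) (v : Nat) : List Char := (nodeCharsRev arena v).reverse

-- ordered first-occurrence insertion (the dedup both programs perform)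
def dIns (d : List Char) (c : Char) : List Char := if c ∈ d then d else d ++ [c]

-- extension characters of substring s, at the final stage …
def extFin (l s : List Char) : List Char :=
  (((List.range (l.length - s.length)).filter (fun a => (l.drop a).take s.length = s)).map
      (fun a => l.getD (a + s.length) ' ')).foldl dIns []

-- … and at build stage (i, j): only extensions already inserted by the double loop
def extStage (l s : List Char) (i j : Nat) : List Char :=
  (((List.range (l.length - s.length)).filter
      (fun a => ((l.drop a).take s.length = s) ∧ (a < i ∨ (a = i ∧ a + s.length < j)))).map
      (fun a => l.getD (a + s.length) ' ')).foldl dIns []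

structure TrieInv (l : List Char) (i j : Nat) (arena : List TNode) : Prop where
  len_pos : 0 < arena.length
  root_parent : (arena.getD 0 defNode).parent = none
  parent_spec : ∀ v, v < arena.length → v ≠ 0 →
    ∃ p, (arena.getD v defNode).parent = some p ∧ p < v ∧
      ((arena.getD v defNode).chr, v) ∈ (arena.getD p defNode).children.items
  inj : ∀ v w, v < arena.length → w < arena.length → strOf arena v = strOf arena w → v = w
  chars : ∀ v, v < arena.length →
    ((arena.getD v defNode).children.items.map Prod.fst) = extStage l (strOf arena v) i j
  childs : ∀ v, v < arena.length → ∀ cu ∈ (arena.getD v defNode).children.items,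
    cu.2 < arena.length ∧ strOf arena cu.2 = strOf arena v ++ [cu.1]


-- ---- basic facts about the arena walk ----

theorem getElem?_of_getD {a : List TNode} {v : Nat} (h : v < a.length) :
    a[v]? = some (a.getD v defNode) := by
  simp [List.getD, List.getElem?_eq_getElem h]

theorem nodeCharsRev_parent (arena : List TNode) (v p : Nat) (h : v < arena.length)
    (hp : (arena.getD v defNode).parent = some p) (hlt : p < v) :
    nodeCharsRev arena v = (arena.getD v defNode).chr :: nodeCharsRev arena p := by
  rw [nodeCharsRev, getElem?_of_getD h]
  simp only []
  rw [hp]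
  simp [hlt]

theorem nodeCharsRev_none (arena : List TNode) (v : Nat) (h : v < arena.length)
    (hp : (arena.getD v defNode).parent = none) :
    nodeCharsRev arena v = [] := by
  rw [nodeCharsRev, getElem?_of_getD h]
  simp only []
  rw [hp]

theorem strOf_parent (arena : List TNode) (v p : Nat) (h : v < arena.length)
    (hp : (arena.getD v defNode).parent = some p) (hlt : p < v) :
    strOf arena v = strOf arena p ++ [(arena.getD v defNode).chr] := by
  simp [strOf, nodeCharsRev_parent arena v p h hp hlt]

theorem strOf_root (arena : List TNode) (h : 0 < arena.length)
    (hp : (arena.getD 0 defNode).parent = none) : strOf arena 0 = [] := by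
  simp [strOf, nodeCharsRev_none arena 0 h hp]

theorem nodeCharsRev_stable (a a' : List TNode) (hlen : a.length ≤ a'.length)
    (hsame : ∀ w, w < a.length → (a'.getD w defNode).parent = (a.getD w defNode).parent ∧
      (a'.getD w defNode).chr = (a.getD w defNode).chr)
    (hwf : ∀ w, w < a.length → ∀ p, (a.getD w defNode).parent = some p → p < w) :
    ∀ v, v < a.length → nodeCharsRev a' v = nodeCharsRev a v := by
  intro v
  induction v using Nat.strong_induction_on with
  | _ v ih =>
    intro hv
    obtain ⟨hpar, hchr⟩ := hsame v hv
    rw [nodeCharsRev, nodeCharsRev, getElem?_of_getD hv, getElem?_of_getD (lt_of_lt_of_le hv hlen)]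
    simp only []
    rw [hpar, hchr]
    cases hp : (a.getD v defNode).parent with
    | none => rfl
    | some p =>
      have hplt : p < v := hwf v hv p hp
      simp only [hplt, dite_true]
      rw [ih p hplt (lt_trans hplt hv)]

theorem strOf_stable (a a' : List TNode) (hlen : a.length ≤ a'.length)
    (hsame : ∀ w, w < a.length → (a'.getD w defNode).parent = (a.getD w defNode).parent ∧
      (a'.getD w defNode).chr = (a.getD w defNode).chr)
    (hwf : ∀ w, w < a.length → ∀ p, (a.getD w defNode).parent = some p → p < w)
    (v : Nat) (hv : v < a.length) : strOf a' v = strOf a v := by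
  simp [strOf, nodeCharsRev_stable a a' hlen hsame hwf v hv]

theorem TrieInv.wf {l : List Char} {i j : Nat} {arena : List TNode} (inv : TrieInv l i j arena) :
    ∀ w, w < arena.length → ∀ p, (arena.getD w defNode).parent = some p → p < w := by
  intro w hw p hp
  by_cases h0 : w = 0
  · rw [h0] at hp; rw [inv.root_parent] at hp; cases hp
  · obtain ⟨q, hq, hlt, -⟩ := inv.parent_spec w hw h0
    rw [hp] at hq; cases hq; exact hlt

theorem mem_dIns (d : List Char) (x c : Char) : c ∈ dIns d x ↔ c ∈ d ∨ c = x := by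
  by_cases h : x ∈ d
  · simp only [dIns, if_pos h]
    constructor
    · exact Or.inl
    · rintro (hc | rfl)
      exacts [hc, h]
  · simp [dIns, if_neg h]

theorem nodup_dIns (d : List Char) (x : Char) (h : d.Nodup) : (dIns d x).Nodup := by
  by_cases hx : x ∈ d <;> simp [dIns, hx, h, List.nodup_append]
  exact fun a ha he => hx (he ▸ ha)

theorem mem_foldl_dIns (cs : List Char) (d : List Char) (c : Char) :
    c ∈ cs.foldl dIns d ↔ c ∈ d ∨ c ∈ cs := by
  induction cs generalizing d with
  | nil => simp
  | cons x cs ih =>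
    simp only [List.foldl_cons, ih, mem_dIns, List.mem_cons]
    tauto

theorem nodup_foldl_dIns (cs : List Char) (d : List Char) (h : d.Nodup) :
    (cs.foldl dIns d).Nodup := by
  induction cs generalizing d with
  | nil => simpa
  | cons x cs ih => exact ih _ (nodup_dIns d x h)


-- ---- stage evolution of the extension-character lists ----

theorem filter_range_split (i : Nat) (p q : Nat → Bool)
    (hlow : ∀ a, a < i → p a = q a) (hhigh : ∀ a, i < a → p a = false ∧ q a = false)
    (hpi : p i = true) (hqi : q i = false) :
    ∀ m, i < m → (List.range m).filter p = ((List.range m).filter q) ++ [i] := by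
  intro m
  induction m with
  | zero => omega
  | succ m ih =>
    intro him
    rw [List.range_succ, List.filter_append, List.filter_append]
    by_cases hmi : m = i
    · subst hmi
      have h1 : (List.range m).filter p = (List.range m).filter q := by
        apply List.filter_congr
        intro a ha
        exact hlow a (List.mem_range.mp ha)
      simp [h1, hpi, hqi]
    · have him' : i < m := by omega
      rw [ih him']
      simp [(hhigh m him').1, (hhigh m him').2]

theorem extStage_zero (l s : List Char) : extStage l s 0 0 = [] := by
  have : ((List.range (l.length - s.length)).filter
      (fun a => decide (((l.drop a).take s.length = s) ∧ (a < 0 ∨ (a = 0 ∧ a + s.length < 0))))) = [] := by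
    apply List.filter_eq_nil_iff.mpr
    intro a _
    simp only [decide_eq_true_eq, not_and, not_or]
    intro _
    omega
  simp only [extStage, this, List.map_nil, List.foldl_nil]

theorem extStage_outer (l s : List Char) (i : Nat) :
    extStage l s i l.length = extStage l s (i + 1) (i + 1) := by
  unfold extStage
  congr 1
  congr 1
  apply List.filter_congr
  intro a ha
  have ha' : a < l.length - s.length := List.mem_range.mp ha
  by_cases hocc : (l.drop a).take s.length = s
  · simp only [hocc, true_and, decide_eq_decide]
    omega
  · simp [hocc]

theorem extStage_fin (l s : List Char) :
    extStage l s l.length l.length = extFin l s := by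
  unfold extStage extFin
  congr 1
  congr 1
  apply List.filter_congr
  intro a ha
  have ha' : a < l.length - s.length := List.mem_range.mp ha
  by_cases hocc : (l.drop a).take s.length = s
  · simp only [hocc, true_and, decide_eq_decide]
    constructor
    · intro; trivial
    · intro; omega
  · simp [hocc]

theorem extStage_step_ne (l : List Char) (s t : List Char) (i j : Nat) (hij : i ≤ j)
    (hocc : (l.drop i).take s.length = s) (hlen : s.length = j - i) (hts : t ≠ s) :
    extStage l t i (j + 1) = extStage l t i j := by
  unfold extStage
  congr 1
  congr 1
  apply List.filter_congr
  intro a _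
  by_cases hocct : (l.drop a).take t.length = t
  · simp only [hocct, true_and, decide_eq_decide]
    by_cases hcase : a = i ∧ a + t.length = j
    · exfalso
      obtain ⟨rfl, hlt⟩ := hcase
      apply hts
      have : t.length = s.length := by omega
      rw [← hocc, ← hocct, this]
    · rw [not_and] at hcase
      constructor
      · intro h
        rcases h with h | ⟨rfl, h2⟩
        · exact Or.inl h
        · right
          refine ⟨rfl, ?_⟩
          have := hcase rfl
          omega
      · intro h
        rcases h with h | ⟨rfl, h2⟩
        · exact Or.inl h
        · exact Or.inr ⟨rfl, by omega⟩
  · simp [hocct]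

theorem extStage_step_self (l s : List Char) (i j : Nat) (hij : i ≤ j) (hj : j < l.length)
    (hocc : (l.drop i).take s.length = s) (hlen : s.length = j - i) :
    extStage l s i (j + 1) = dIns (extStage l s i j) (l.getD j ' ') := by
  have hi_lt : i < l.length - s.length := by
    have h1 : i + s.length = j := by omega
    omega
  have hsplit : ((List.range (l.length - s.length)).filter
        (fun a => decide (((l.drop a).take s.length = s) ∧ (a < i ∨ (a = i ∧ a + s.length < j + 1))))) =
      ((List.range (l.length - s.length)).filter
        (fun a => decide (((l.drop a).take s.length = s) ∧ (a < i ∨ (a = i ∧ a + s.length < j))))) ++ [i] := by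
    apply filter_range_split
    · intro a ha
      by_cases hocca : (l.drop a).take s.length = s
      · simp only [hocca, true_and, decide_eq_decide]
        omega
      · simp [hocca]
    · intro a ha
      constructor <;>
        · simp only [not_and, not_or, decide_eq_false_iff_not]
          intro _
          omega
    · simp only [decide_eq_true_eq]
      exact ⟨hocc, Or.inr ⟨trivial, by omega⟩⟩
    · simp only [decide_eq_false_iff_not, not_and, not_or]
      intro _
      omega
    · exact hi_lt
  unfold extStage
  rw [hsplit, List.map_append, List.foldl_append]
  simp only [List.map_cons, List.map_nil, List.foldl_cons, List.foldl_nil]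
  have : i + s.length = j := by omega
  rw [this]

theorem extStage_new (l s : List Char) (i j : Nat) (hij : i ≤ j) (_hj : j < l.length)
    (hocc : (l.drop i).take s.length = s) (hlen : s.length = j - i)
    (hnotin : l.getD j ' ' ∉ extStage l s i j) :
    extStage l (s ++ [l.getD j ' ']) i (j + 1) = [] := by
  set c := l.getD j ' ' with hc
  have : ((List.range (l.length - (s ++ [c]).length)).filter
      (fun a => decide (((l.drop a).take (s ++ [c]).length = s ++ [c]) ∧
        (a < i ∨ (a = i ∧ a + (s ++ [c]).length < j + 1))))) = [] := by
    apply List.filter_eq_nil_iff.mpr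
    intro a ha
    have ha' : a < l.length - (s.length + 1) := by
      simpa using List.mem_range.mp ha
    simp only [decide_eq_true_eq, not_and, not_or, List.length_append, List.length_cons,
      List.length_nil]
    intro hocca0
    have hocca : (l.drop a).take (s.length + 1) = s ++ [c] := by
      simpa using hocca0
    constructor
    · -- a < i is impossible: it would mean c was already a recorded extension of s
      intro halt
      apply hnotin
      rw [hc]
      unfold extStage
      rw [mem_foldl_dIns]
      right
      rw [List.mem_map]
      refine ⟨a, ?_, ?_⟩
      · rw [List.mem_filter]
        constructor
        · exact List.mem_range.mpr (by omega)
        · simp only [decide_eq_true_eq]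
          refine ⟨?_, Or.inl halt⟩
          have : (l.drop a).take s.length = ((l.drop a).take (s.length + 1)).take s.length := by
            rw [List.take_take]
            congr 1
            omega
          rw [this, hocca]
          exact List.take_left ..
      · -- the character after this occurrence of s is c
        have h1 : ((l.drop a).take (s.length + 1))[s.length]? = some c := by
          rw [hocca]
          exact List.getElem?_concat_length ..
        rw [List.getElem?_take_of_lt (by omega), List.getElem?_drop] at h1
        rw [List.getD_eq_getElem?_getD, h1]
        rfl
    · intro rfl
      omega
  unfold extStage
  rw [show (s ++ [c]).length = s.length + 1 by simp] at this ⊢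
  rw [this]
  rfl

theorem nodup_extFin (l s : List Char) : (extFin l s).Nodup :=
  nodup_foldl_dIns _ _ (List.nodup_nil)


-- ---- one step of the trie builder preserves the invariant ----

theorem take_drop_succ (l : List Char) (i j : Nat) (hij : i ≤ j) (hj : j < l.length) :
    (l.drop i).take (j + 1 - i) = (l.drop i).take (j - i) ++ [l.getD j ' '] := by
  have h1 : j + 1 - i = (j - i) + 1 := by omega
  rw [h1, List.take_add_one, List.getElem?_drop]
  have h2 : i + (j - i) = j := by omega
  rw [h2, List.getElem?_eq_getElem hj]
  rw [List.getD_eq_getElem?_getD, List.getElem?_eq_getElem hj]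
  rfl

theorem trieStep_inv (l : List Char) (i j : Nat) (hij : i ≤ j) (hj : j < l.length)
    (arena : List TNode) (cur : Nat) (inv : TrieInv l i j arena) (hcur : cur < arena.length)
    (hs : strOf arena cur = (l.drop i).take (j - i)) :
    TrieInv l i (j + 1) (trieStep l (arena, cur) j).1 ∧
      (trieStep l (arena, cur) j).2 < (trieStep l (arena, cur) j).1.length ∧
      strOf (trieStep l (arena, cur) j).1 (trieStep l (arena, cur) j).2 =
        (l.drop i).take (j + 1 - i) ∧
      arena.length ≤ (trieStep l (arena, cur) j).1.length := by
  have hslen : (strOf arena cur).length = j - i := by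
    rw [hs]
    simp only [List.length_take, List.length_drop]
    omega
  have hocc : (l.drop i).take (strOf arena cur).length = strOf arena cur := by
    rw [hslen]; exact hs.symm
  set c := l.getD j ' ' with hc
  set nd := arena.getD cur defNode with hnd
  cases hget : PySem.Dict.get? nd.children c with
  | some u =>
    have hstep : trieStep l (arena, cur) j = (arena, u) := by
      simp only [trieStep, ← hc, ← hnd, hget]
    rw [hstep]
    dsimp only
    have hmem : (c, u) ∈ nd.children.items := PySem.Dict.mem_items_of_get?_eq_some _ hget
    have hcin : c ∈ extStage l (strOf arena cur) i j := by
      rw [← inv.chars cur hcur]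
      exact List.mem_map_of_mem hmem
    obtain ⟨hu_lt, hu_str⟩ := inv.childs cur hcur (c, u) hmem
    refine ⟨?_, hu_lt, ?_, le_refl _⟩
    · refine ⟨inv.len_pos, inv.root_parent, inv.parent_spec, inv.inj, ?_, inv.childs⟩
      intro v hv
      by_cases hvc : v = cur
      · subst hvc
        rw [extStage_step_self l (strOf arena v) i j hij hj hocc hslen, ← hc]
        rw [inv.chars v hv]
        simp [dIns, hcin]
      · have hne : strOf arena v ≠ strOf arena cur := fun h => hvc (inv.inj v cur hv hcur h)
        rw [extStage_step_ne l (strOf arena cur) (strOf arena v) i j hij hocc hslen hne]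
        exact inv.chars v hv
    · rw [hu_str, hs, take_drop_succ l i j hij hj]
  | none =>
    set nd' : TNode := { nd with children := nd.children.insert c arena.length } with hnd'
    set newNode : TNode := ⟨PySem.Dict.empty, some cur, c, nd.depth + 1⟩ with hnew
    set arena' : List TNode := (arena.set cur nd') ++ [newNode] with harena'
    have hstep : trieStep l (arena, cur) j = (arena', arena.length) := by
      simp only [trieStep, ← hc, ← hnd, hget]
      rw [harena', hnd', hnew]
    rw [hstep]
    dsimp only
    have hlen' : arena'.length = arena.length + 1 := by simp [harena']
    have hset_len : (arena.set cur nd').length = arena.length := by simp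
    have hgetne : ∀ w, w < arena.length → w ≠ cur → arena'.getD w defNode = arena.getD w defNode := by
      intro w hw hne
      simp only [harena', List.getD,
        List.getElem?_append_left (show w < (arena.set cur nd').length by omega)]
      rw [List.getElem?_set_ne (fun h => hne h.symm)]
    have hgetcur : arena'.getD cur defNode = nd' := by
      simp only [harena', List.getD,
        List.getElem?_append_left (show cur < (arena.set cur nd').length by omega)]
      rw [List.getElem?_set_self (by omega)]
      rfl
    have hgetm : arena'.getD arena.length defNode = newNode := by
      simp only [harena', List.getD]
      rw [show arena.length = (arena.set cur nd').length from by omega, List.getElem?_concat_length]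
      rfl
    have hsame : ∀ w, w < arena.length →
        (arena'.getD w defNode).parent = (arena.getD w defNode).parent ∧
        (arena'.getD w defNode).chr = (arena.getD w defNode).chr := by
      intro w hw
      by_cases hwc : w = cur
      · subst hwc
        rw [hgetcur, ← hnd]
        exact ⟨rfl, rfl⟩
      · rw [hgetne w hw hwc]
        exact ⟨rfl, rfl⟩
    have hstr : ∀ w, w < arena.length → strOf arena' w = strOf arena w :=
      strOf_stable arena arena' (by omega) hsame inv.wf
    have hstrm : strOf arena' arena.length = strOf arena cur ++ [c] := by
      rw [strOf_parent arena' arena.length cur (by omega) (by rw [hgetm]) hcur]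
      rw [hstr cur hcur, hgetm]
    have hc_not : c ∉ extStage l (strOf arena cur) i j := by
      rw [← inv.chars cur hcur]
      intro hmem
      have hk := hget
      rw [PySem.Dict.get?_eq_none_iff_not_mem_keys] at hk
      apply hk
      simp only [PySem.Dict.keys]
      rw [← hnd] at hmem
      exact hmem
    have hitems : nd'.children.items = nd.children.items ++ [(c, arena.length)] := by
      rw [hnd']
      apply PySem.Dict.items_insert_of_not_contains
      rw [PySem.Dict.contains_eq_isSome_get?, hget]
      rfl
    have hnew_unique : ∀ w, w < arena.length → strOf arena w ≠ strOf arena cur ++ [c] := by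
      intro w hw heq
      have hwne0 : w ≠ 0 := by
        intro h0
        subst h0
        rw [strOf_root arena inv.len_pos inv.root_parent] at heq
        simp at heq
      obtain ⟨p, hp, hplt, hmem⟩ := inv.parent_spec w hw hwne0
      have hw_eq : strOf arena w = strOf arena p ++ [(arena.getD w defNode).chr] :=
        strOf_parent arena w p hw hp hplt
      rw [hw_eq] at heq
      have hps : strOf arena p = strOf arena cur := by
        have h2 := congrArg List.dropLast heq
        simpa [List.dropLast_concat] using h2
      have hchr : (arena.getD w defNode).chr = c := by
        have h2 := congrArg List.getLast? heq
        simpa [List.getLast?_concat] using h2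
      have hpcur : p = cur := inv.inj p cur (lt_trans hplt hw) hcur hps
      rw [hpcur, hchr] at hmem
      apply hc_not
      rw [← inv.chars cur hcur]
      exact List.mem_map_of_mem hmem
    refine ⟨?_, by omega, ?_, by omega⟩
    · refine ⟨by omega, ?_, ?_, ?_, ?_, ?_⟩
      · -- root_parent
        rw [(hsame 0 (by omega)).1]
        exact inv.root_parent
      · -- parent_spec
        intro v hv hv0
        rw [hlen'] at hv
        by_cases hvm : v = arena.length
        · subst hvm
          refine ⟨cur, by rw [hgetm], hcur, ?_⟩
          rw [hgetm, hgetcur, hitems]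
          simp [hnew]
        · have hvlt : v < arena.length := by omega
          obtain ⟨p, hp, hplt, hmem⟩ := inv.parent_spec v hvlt hv0
          refine ⟨p, by rw [(hsame v hvlt).1]; exact hp, hplt, ?_⟩
          rw [(hsame v hvlt).2]
          by_cases hpc : p = cur
          · subst hpc
            rw [hgetcur, hitems]
            exact List.mem_append_left _ hmem
          · rw [hgetne p (lt_trans hplt hvlt) hpc]
            exact hmem
      · -- inj
        intro v w hv hw hvw
        rw [hlen'] at hv hw
        by_cases hvm : v = arena.length <;> by_cases hwm : w = arena.length
        · omega
        · exfalso
          subst hvm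
          rw [hstrm, hstr w (by omega)] at hvw
          exact hnew_unique w (by omega) hvw.symm
        · exfalso
          subst hwm
          rw [hstrm, hstr v (by omega)] at hvw
          exact hnew_unique v (by omega) hvw
        · exact inv.inj v w (by omega) (by omega)
            (by rwa [hstr v (by omega), hstr w (by omega)] at hvw)
      · -- chars
        intro v hv
        rw [hlen'] at hv
        by_cases hvm : v = arena.length
        · subst hvm
          rw [hgetm, hstrm]
          have hnewext := extStage_new l (strOf arena cur) i j hij hj hocc hslen hc_not
          rw [← hc] at hnewext
          rw [hnewext]
          rfl
        · have hvlt : v < arena.length := by omega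
          rw [hstr v hvlt]
          by_cases hvc : v = cur
          · subst hvc
            rw [hgetcur, hitems, extStage_step_self l (strOf arena v) i j hij hj hocc hslen, ← hc]
            rw [List.map_append, inv.chars v hvlt]
            simp [dIns, hc_not]
          · rw [hgetne v hvlt hvc]
            have hne : strOf arena v ≠ strOf arena cur := fun h => hvc (inv.inj v cur hvlt hcur h)
            rw [extStage_step_ne l (strOf arena cur) (strOf arena v) i j hij hocc hslen hne]
            exact inv.chars v hvlt
      · -- childs
        intro v hv cu hmem
        rw [hlen'] at hv
        by_cases hvm : v = arena.length
        · subst hvm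
          rw [hgetm, hnew] at hmem
          have hemp : ((PySem.Dict.empty : PySem.Dict Char Nat)).items = [] := rfl
          simp only [hemp] at hmem
          cases hmem
        · have hvlt : v < arena.length := by omega
          rw [hstr v hvlt]
          by_cases hvc : v = cur
          · subst hvc
            rw [hgetcur, hitems] at hmem
            rcases List.mem_append.mp hmem with hmem | hmem
            · obtain ⟨hu_lt, hu_str⟩ := inv.childs v hvlt cu hmem
              exact ⟨by omega, by rw [hstr cu.2 hu_lt]; exact hu_str⟩
            · have hcu : cu = (c, arena.length) := by simpa using hmem
              subst hcu
              exact ⟨by omega, hstrm⟩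
          · rw [hgetne v hvlt hvc] at hmem
            obtain ⟨hu_lt, hu_str⟩ := inv.childs v hvlt cu hmem
            exact ⟨by omega, by rw [hstr cu.2 hu_lt]; exact hu_str⟩
    · rw [hstrm, hs, take_drop_succ l i j hij hj]

-- ---- the whole double loop: invariant for the finished trie ----

theorem inner_inv (l : List Char) (i : Nat) : ∀ (k j : Nat), j + k = l.length → i ≤ j →
    ∀ st : List TNode × Nat, TrieInv l i j st.1 → st.2 < st.1.length →
      strOf st.1 st.2 = (l.drop i).take (j - i) →
      TrieInv l i l.length ((List.range' j k).foldl (trieStep l) st).1 := by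
  intro k
  induction k with
  | zero =>
    intro j hj _ st hinv _ _
    rw [List.range'_zero, List.foldl_nil]
    rwa [show l.length = j by omega]
  | succ k ih =>
    intro j hj hij st hinv hcur hstr
    rw [List.range'_succ, List.foldl_cons]
    obtain ⟨h1, h2, h3, _⟩ :=
      trieStep_inv l i j hij (by omega) st.1 st.2 hinv hcur hstr
    exact ih (j + 1) (by omega) (by omega) (trieStep l st j) h1 h2 h3

theorem TrieInv_shift (l : List Char) (arena : List TNode) (i : Nat)
    (h : TrieInv l i l.length arena) : TrieInv l (i + 1) (i + 1) arena :=
  ⟨h.len_pos, h.root_parent, h.parent_spec, h.inj,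
    fun v hv => by rw [← extStage_outer]; exact h.chars v hv, h.childs⟩

theorem outer_inv (l : List Char) : ∀ (k i : Nat), i + k = l.length →
    ∀ arena, TrieInv l i i arena →
      TrieInv l l.length l.length ((List.range' i k).foldl
        (fun ar i' => ((List.range' i' (l.length - i')).foldl (trieStep l) (ar, 0)).1) arena) := by
  intro k
  induction k with
  | zero =>
    intro i hi arena hinv
    rw [List.range'_zero, List.foldl_nil]
    rwa [show l.length = i from by omega]
  | succ k ih =>
    intro i hi arena hinv
    rw [List.range'_succ, List.foldl_cons]
    have hstep := inner_inv l i (l.length - i) i (by omega) (le_refl i) (arena, 0) hinv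
      hinv.len_pos (by
        rw [strOf_root arena hinv.len_pos hinv.root_parent]
        simp)
    exact ih (i + 1) (by omega) _ (TrieInv_shift l _ i hstep)

theorem build_inv (l : List Char) : TrieInv l l.length l.length (buildSuffixTrie l) := by
  unfold buildSuffixTrie
  rw [List.range_eq_range']
  apply outer_inv l l.length 0 (by omega)
  constructor
  · simp
  · rfl
  · intro v hv hv0
    exfalso
    simp at hv
    exact hv0 hv
  · intro v w hv hw _
    simp at hv hw
    omega
  · intro v hv
    simp at hv
    subst hv
    rw [extStage_zero]
    rfl
  · intro v hv cu hmem
    simp at hv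
    subst hv
    have hemp : (([⟨PySem.Dict.empty, none, ' ', 0⟩] : List TNode).getD 0 defNode).children.items = [] := rfl
    rw [hemp] at hmem
    cases hmem

-- ---- BFS side: queue flushing and level-by-level correspondence ----

theorem getSub_eq_strOf (T : List TNode) (v : Nat) : getSubstringFromNode T v = strOf T v := rfl

theorem bfsA_nil (T : List TNode) (t2 : List Char) (f : Nat) : bfsA T t2 (f + 1) [] = [] := rfl

theorem bfsA_cons (T : List TNode) (t2 : List Char) (f v : Nat) (q : List Nat) :
    bfsA T t2 (f + 1) (v :: q) =
      (match (if v ≠ 0 then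
            (if substringExistsInText t2 (getSubstringFromNode T v) then none
             else some (getSubstringFromNode T v))
          else none) with
       | some s => s
       | none => bfsA T t2 f (q ++ (T.getD v defNode).children.values)) := rfl

theorem bfs_flush (T : List TNode) (t2 : List Char) :
    ∀ (q acc : List Nat) (f : Nat), (∀ v ∈ q, v ≠ 0) →
    bfsA T t2 (q.length + f) (q ++ acc) =
      (match q.find? (fun v => !(substringExistsInText t2 (strOf T v))) with
       | some v => strOf T v
       | none => bfsA T t2 f (acc ++ q.flatMap (fun v => (T.getD v defNode).children.values))) := by
  intro q
  induction q with
  | nil =>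
    intro acc f _
    simp [List.find?]
  | cons v q ih =>
    intro acc f hne
    have hv0 : v ≠ 0 := hne v (by simp)
    have hlen : (v :: q).length + f = (q.length + f) + 1 := by simp; omega
    rw [hlen, List.cons_append, bfsA_cons, getSub_eq_strOf]
    cases hex : substringExistsInText t2 (strOf T v) with
    | true =>
      simp only [hv0, if_true, ne_eq, not_false_eq_true]
      rw [List.append_assoc]
      rw [ih (acc ++ (T.getD v defNode).children.values) f (fun w hw => hne w (by simp [hw]))]
      have hfind : (v :: q).find? (fun v => !(substringExistsInText t2 (strOf T v))) =
          q.find? (fun v => !(substringExistsInText t2 (strOf T v))) := by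
        rw [List.find?_cons_of_neg]
        simp [hex]
      rw [hfind]
      cases hf2 : q.find? (fun v => !(substringExistsInText t2 (strOf T v))) with
      | some w => rfl
      | none =>
        simp only [List.flatMap_cons, List.append_assoc]
    | false =>
      have hfind : (v :: q).find? (fun v => !(substringExistsInText t2 (strOf T v))) = some v := by
        rw [List.find?_cons_of_pos]
        simp [hex]
      rw [hfind]
      simp [hv0]

-- ---- B's next-level computation, characterised ----

theorem innerFold (l s : List Char) (L : Nat) (_hL : s.length = L) :
    ∀ (as : List Nat) (acc : List (List Char)) (d : List Char),
    (∀ t ∈ acc, t.dropLast ≠ s) →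
    as.foldl (fun nxt a =>
        if (l.drop a).take L = s then
          (if s ++ [l.getD (a + L) ' '] ∈ nxt then nxt else nxt ++ [s ++ [l.getD (a + L) ' ']])
        else nxt)
      (acc ++ d.map (fun c => s ++ [c])) =
      acc ++ (((as.filter (fun a => decide ((l.drop a).take L = s))).map
          (fun a => l.getD (a + L) ' ')).foldl dIns d).map (fun c => s ++ [c]) := by
  intro as
  induction as with
  | nil => intro acc d _; simp
  | cons a as ih =>
    intro acc d hacc
    by_cases hocc : (l.drop a).take L = s
    · rw [List.foldl_cons, if_pos hocc]
      have hmem : (s ++ [l.getD (a + L) ' '] ∈ acc ++ d.map (fun c => s ++ [c])) ↔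
          l.getD (a + L) ' ' ∈ d := by
        rw [List.mem_append]
        constructor
        · rintro (h | h)
          · exact ((hacc _ h) (List.dropLast_concat ..)).elim
          · obtain ⟨c, hc, hceq⟩ := List.mem_map.mp h
            have : c = l.getD (a + L) ' ' := by simpa using hceq
            exact this ▸ hc
        · intro h
          exact Or.inr (List.mem_map.mpr ⟨_, h, rfl⟩)
      rw [List.filter_cons_of_pos (by simpa using hocc), List.map_cons, List.foldl_cons]
      by_cases hd : l.getD (a + L) ' ' ∈ d
      · rw [if_pos (hmem.mpr hd)]
        rw [show dIns d (l.getD (a + L) ' ') = d from by simp only [dIns, if_pos hd]]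
        exact ih acc d hacc
      · rw [if_neg (fun h => hd (hmem.mp h))]
        rw [show dIns d (l.getD (a + L) ' ') = d ++ [l.getD (a + L) ' '] from by
          simp only [dIns, if_neg hd]]
        rw [List.append_assoc, show List.map (fun c => s ++ [c]) d ++ [s ++ [l.getD (a + L) ' ']] =
          List.map (fun c => s ++ [c]) (d ++ [l.getD (a + L) ' ']) from by simp]
        exact ih acc (d ++ [l.getD (a + L) ' ']) hacc
    · rw [List.foldl_cons, if_neg hocc, List.filter_cons_of_neg (by simpa using hocc)]
      exact ih acc d hacc

theorem extFin_L (l s : List Char) (L : Nat) (hL : s.length = L) :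
    extFin l s = (((List.range (l.length - L)).filter
        (fun a => decide ((l.drop a).take L = s))).map (fun a => l.getD (a + L) ' ')).foldl dIns [] := by
  simp only [extFin, hL]

theorem nxt_eq (l : List Char) (L : Nat) :
    ∀ (strs : List (List Char)) (acc : List (List Char)),
    (∀ s ∈ strs, s.length = L) → strs.Nodup →
    (∀ s ∈ strs, ∀ t ∈ acc, t.dropLast ≠ s) →
    strs.foldl (fun nxt s =>
        (List.range (l.length - L)).foldl (fun nxt a =>
          if (l.drop a).take L = s then
            (if s ++ [l.getD (a + L) ' '] ∈ nxt then nxt else nxt ++ [s ++ [l.getD (a + L) ' ']])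
          else nxt) nxt) acc =
      acc ++ strs.flatMap (fun s => (extFin l s).map (fun c => s ++ [c])) := by
  intro strs
  induction strs with
  | nil => intro acc _ _ _; simp
  | cons s strs ih =>
    intro acc hlen hnd hacc
    rw [List.foldl_cons]
    have hinner := innerFold l s L (hlen s (by simp)) (List.range (l.length - L)) acc [] 
      (hacc s (by simp))
    rw [List.map_nil, List.append_nil] at hinner
    rw [hinner, ← extFin_L l s L (hlen s (by simp))]
    rw [ih (acc ++ (extFin l s).map (fun c => s ++ [c]))
      (fun t ht => hlen t (by simp [ht])) hnd.of_cons ?hacc']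
    · rw [List.flatMap_cons, List.append_assoc]
    case hacc' =>
      intro s' hs' t ht
      rcases List.mem_append.mp ht with h | h
      · exact hacc s' (by simp [hs']) t h
      · obtain ⟨c, _, rfl⟩ := List.mem_map.mp h
        rw [List.dropLast_concat]
        intro hss
        subst hss
        exact (List.nodup_cons.mp hnd).1 hs'

theorem mem_extFin (l s : List Char) (c : Char) (h : c ∈ extFin l s) :
    ∃ a, a + (s.length + 1) ≤ l.length ∧ (l.drop a).take (s.length + 1) = s ++ [c] := by
  unfold extFin at h
  rw [mem_foldl_dIns] at h
  rcases h with h | h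
  · cases h
  · obtain ⟨a, ha, hc⟩ := List.mem_map.mp h
    rw [List.mem_filter] at ha
    obtain ⟨har, hocc⟩ := ha
    have har' : a < l.length - s.length := List.mem_range.mp har
    have hocc' : (l.drop a).take s.length = s := by simpa using hocc
    refine ⟨a, by omega, ?_⟩
    have := take_drop_succ l a (a + s.length) (by omega) (by omega)
    rw [show a + s.length + 1 - a = s.length + 1 from by omega,
      show a + s.length - a = s.length from by omega] at this
    rw [this, hocc', hc]

theorem mem_group_dropLast (s t : List Char) (es : List Char)
    (h : t ∈ es.map (fun c => s ++ [c])) : t.dropLast = s := by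
  obtain ⟨c, _, rfl⟩ := List.mem_map.mp h
  exact List.dropLast_concat ..

theorem nodup_next (l : List Char) (strs : List (List Char)) (hnd : strs.Nodup) :
    (strs.flatMap (fun s => (extFin l s).map (fun c => s ++ [c]))).Nodup := by
  induction strs with
  | nil => simp
  | cons s strs ih =>
    rw [List.flatMap_cons]
    apply List.Nodup.append
    · exact (nodup_extFin l s).map (fun c₁ c₂ h => by simpa using h)
    · exact ih hnd.of_cons
    · intro t ht ht'
      obtain ⟨s', hs', hts'⟩ := List.mem_flatMap.mp ht'
      have h1 : t.dropLast = s := mem_group_dropLast s t _ ht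
      have h2 : t.dropLast = s' := mem_group_dropLast s' t _ hts'
      exact (List.nodup_cons.mp hnd).1 (by rw [← h1.symm.trans h2] at hs'; exact hs')

-- ---- per-node children, read through the invariant ----

theorem childVals_map (l : List Char) (T : List TNode) (hT : TrieInv l l.length l.length T)
    (v : Nat) (hv : v < T.length) :
    ((T.getD v defNode).children.values).map (strOf T) =
      (extFin l (strOf T v)).map (fun c => strOf T v ++ [c]) := by
  have hchars := hT.chars v hv
  rw [extStage_fin] at hchars
  simp only [PySem.Dict.values]
  rw [← hchars, List.map_map, List.map_map]
  apply List.map_congr_left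
  intro cu hcu
  simp only [Function.comp_apply]
  exact (hT.childs v hv cu hcu).2

theorem childVals_mem (l : List Char) (T : List TNode) (hT : TrieInv l l.length l.length T)
    (v : Nat) (hv : v < T.length) (u : Nat)
    (hu : u ∈ (T.getD v defNode).children.values) :
    u ≠ 0 ∧ u < T.length ∧ (strOf T u).length = (strOf T v).length + 1 ∧
      ∃ a, a + (strOf T u).length ≤ l.length ∧
        (l.drop a).take (strOf T u).length = strOf T u := by
  simp only [PySem.Dict.values] at hu
  obtain ⟨cu, hcu, rfl⟩ := List.mem_map.mp hu
  obtain ⟨hlt, hstr⟩ := hT.childs v hv cu hcu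
  have hc_mem : cu.1 ∈ extFin l (strOf T v) := by
    rw [← extStage_fin, ← hT.chars v hv]
    exact List.mem_map_of_mem hcu
  obtain ⟨a, ha, hocc⟩ := mem_extFin l (strOf T v) cu.1 hc_mem
  have hlen : (strOf T cu.2).length = (strOf T v).length + 1 := by rw [hstr]; simp
  refine ⟨?_, hlt, hlen, ⟨a, by omega, by rw [hlen, hstr]; exact hocc⟩⟩
  intro h0
  rw [h0] at hstr
  rw [strOf_root T hT.len_pos hT.root_parent] at hstr
  exact absurd hstr.symm (by simp)

-- ---- trivial evolutions of B's loop state ----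

theorem fold_altBody_inl (l t2 : List Char) (rs : List Nat) (s : List Char) :
    rs.foldl (altBody l t2) (.inl s) = .inl s := by
  induction rs with
  | nil => rfl
  | cons r rs ih => rw [List.foldl_cons]; exact ih

theorem altBody_inr_nil (l t2 : List Char) (L : Nat) : altBody l t2 (.inr []) L = .inr [] := rfl

theorem fold_altBody_nil (l t2 : List Char) (rs : List Nat) :
    rs.foldl (altBody l t2) (.inr []) = .inr [] := by
  induction rs with
  | nil => rfl
  | cons r rs ih => rw [List.foldl_cons, altBody_inr_nil]; exact ih

theorem flatMap_congr_mem {α β : Type} (xs : List α) (f g : α → List β)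
    (h : ∀ x ∈ xs, f x = g x) : xs.flatMap f = xs.flatMap g := by
  induction xs with
  | nil => rfl
  | cons x xs ih =>
    rw [List.flatMap_cons, List.flatMap_cons, h x (by simp),
      ih (fun y hy => h y (by simp [hy]))]

-- ---- the main level-by-level equivalence ----

theorem main_levels (l t2 : List Char) (T : List TNode) (hT : TrieInv l l.length l.length T) :
    ∀ (k L : Nat) (ids : List Nat) (f : Nat), k = l.length + 1 - L → 1 ≤ L → L ≤ l.length + 1 →
    (∀ v ∈ ids, v ≠ 0 ∧ v < T.length ∧ (strOf T v).length = L ∧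
        ∃ a, a + L ≤ l.length ∧ (l.drop a).take L = strOf T v) →
    ((ids.map (strOf T)).Nodup) →
    ((l.length + 2 - L) * (T.length + 1) ≤ f) →
    bfsA T t2 f ids =
      (match (List.range' L (l.length + 1 - L)).foldl (altBody l t2) (.inr (ids.map (strOf T))) with
       | .inl s => s | .inr _ => []) := by
  intro k
  induction k using Nat.strong_induction_on with
  | _ k ih =>
    intro L ids f hk hL1 hL2 hm hnd hf
    have hfpos : 1 ≤ f :=
      le_trans (Nat.mul_pos (by omega : 0 < l.length + 2 - L)
        (by omega : 0 < T.length + 1)) hf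
    cases hids : ids with
    | nil =>
      obtain ⟨f', rfl⟩ : ∃ f', f = f' + 1 := ⟨f - 1, by omega⟩
      rw [bfsA_nil]
      rw [List.map_nil, fold_altBody_nil]
    | cons v0 q0 =>
      rw [← hids]
      have hne : ids ≠ [] := by rw [hids]; exact List.cons_ne_nil _ _
      have hLn : L ≤ l.length := by
        obtain ⟨a, ha, -⟩ := (hm v0 (by rw [hids]; simp)).2.2.2
        omega
      have hids_nd : ids.Nodup := hnd.of_map
      have hlen_ids : ids.length ≤ T.length := by
        have h1 : ids.toFinset.card = ids.length := List.toFinset_card_of_nodup hids_nd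
        have h2 : ids.toFinset ⊆ Finset.range T.length := by
          intro x hx
          rw [List.mem_toFinset] at hx
          rw [Finset.mem_range]
          exact (hm x hx).2.1
        have h3 := Finset.card_le_card h2
        rw [h1, Finset.card_range] at h3
        exact h3
      have hrange : List.range' L (l.length + 1 - L) = L :: List.range' (L + 1) (l.length - L) := by
        rw [show l.length + 1 - L = (l.length - L) + 1 from by omega, List.range'_succ]
      rw [hrange, List.foldl_cons]
      have hflarge : T.length + 1 ≤ f :=
        le_trans (Nat.le_mul_of_pos_left (T.length + 1) (by omega : 0 < l.length + 2 - L)) hf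
      have hflush := bfs_flush T t2 ids [] (f - ids.length) (fun v hv => (hm v hv).1)
      rw [List.append_nil] at hflush
      rw [show f = ids.length + (f - ids.length) from by omega, hflush]
      cases hfind : ids.find? (fun v => !(substringExistsInText t2 (strOf T v))) with
      | some v =>
        have hfind' : (ids.map (strOf T)).find? (fun s => !(PySem.Chars.isIn s t2)) =
            some (strOf T v) := by
          rw [List.find?_map,
            show ((fun s => !PySem.Chars.isIn s t2) ∘ strOf T) =
              (fun v => !substringExistsInText t2 (strOf T v)) from rfl, hfind]
          rfl
        rw [show altBody l t2 (.inr (ids.map (strOf T))) L = .inl (strOf T v) from by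
          simp only [altBody, hfind']]
        rw [fold_altBody_inl]
      | none =>
        have hfind' : (ids.map (strOf T)).find? (fun s => !(PySem.Chars.isIn s t2)) = none := by
          rw [List.find?_map,
            show ((fun s => !PySem.Chars.isIn s t2) ∘ strOf T) =
              (fun v => !substringExistsInText t2 (strOf T v)) from rfl, hfind]
          rfl
        have hlens : ∀ s ∈ ids.map (strOf T), s.length = L := by
          intro s hs
          obtain ⟨v, hv, rfl⟩ := List.mem_map.mp hs
          exact (hm v hv).2.2.1
        have hstep : altBody l t2 (.inr (ids.map (strOf T))) L =
            .inr ((ids.map (strOf T)).flatMap (fun s => (extFin l s).map (fun c => s ++ [c]))) := by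
          simp only [altBody, hfind']
          congr 1
          have := nxt_eq l L (ids.map (strOf T)) [] hlens hnd (by intro s _ t ht; cases ht)
          rw [List.nil_append] at this
          exact this
        rw [hstep]
        have hmap' : (ids.flatMap (fun v => (T.getD v defNode).children.values)).map (strOf T) =
            (ids.map (strOf T)).flatMap (fun s => (extFin l s).map (fun c => s ++ [c])) := by
          rw [List.map_flatMap, List.flatMap_map]
          apply flatMap_congr_mem
          intro v hv
          exact childVals_map l T hT v (hm v hv).2.1
        rw [← hmap']
        have hm' : ∀ u ∈ ids.flatMap (fun v => (T.getD v defNode).children.values),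
            u ≠ 0 ∧ u < T.length ∧ (strOf T u).length = L + 1 ∧
              ∃ a, a + (L + 1) ≤ l.length ∧ (l.drop a).take (L + 1) = strOf T u := by
          intro u hu
          obtain ⟨v, hv, huv⟩ := List.mem_flatMap.mp hu
          obtain ⟨h0, hlt, hlen1, a, ha, hocc⟩ :=
            childVals_mem l T hT v (hm v hv).2.1 u huv
          have hvL : (strOf T v).length = L := (hm v hv).2.2.1
          rw [hvL] at hlen1
          exact ⟨h0, hlt, hlen1, a, by rw [← hlen1]; exact ha, by rw [← hlen1]; exact hocc⟩
        have hnd' : ((ids.flatMap (fun v => (T.getD v defNode).children.values)).map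
            (strOf T)).Nodup := by
          rw [hmap']
          exact nodup_next l (ids.map (strOf T)) hnd
        have hmul : (l.length + 2 - L) * (T.length + 1) =
            (l.length + 1 - L) * (T.length + 1) + (T.length + 1) := by
          rw [show l.length + 2 - L = (l.length + 1 - L) + 1 from by omega, Nat.succ_mul]
        rw [show (l.length - L) = l.length + 1 - (L + 1) from by omega]
        show bfsA T t2 (f - ids.length)
            (List.flatMap (fun v => (T.getD v defNode).children.values) ids) = _
        exact ih (l.length + 1 - (L + 1)) (by omega) (L + 1) _ (f - ids.length) rfl
          (by omega) (by omega) hm' hnd'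
          (by rw [show l.length + 2 - (L + 1) = l.length + 1 - L from by omega]; omega)

-- ---- gluing: the root level ----

theorem map_getD_range (l : List Char) :
    (List.range l.length).map (fun a => l.getD a ' ') = l := by
  apply List.ext_getElem (by simp)
  intro i h1 h2
  simp [List.getD_eq_getElem?_getD, List.getElem?_eq_getElem h2]

theorem level0_eq (cs : List Char) : ∀ d : List Char,
    cs.foldl (fun acc c => if [c] ∈ acc then acc else acc ++ [[c]]) (d.map (fun c => [c])) =
      (cs.foldl dIns d).map (fun c => [c]) := by
  induction cs with
  | nil => intro d; rfl
  | cons c cs ih =>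
    intro d
    rw [List.foldl_cons, List.foldl_cons]
    have hmem : ([c] ∈ d.map (fun c => [c])) ↔ c ∈ d := by
      constructor
      · intro h
        obtain ⟨x, hx, he⟩ := List.mem_map.mp h
        have : x = c := by simpa using he
        exact this ▸ hx
      · intro h
        exact List.mem_map.mpr ⟨c, h, rfl⟩
    by_cases hd : c ∈ d
    · rw [if_pos (hmem.mpr hd), show dIns d c = d from by simp only [dIns, if_pos hd]]
      exact ih d
    · rw [if_neg (fun h => hd (hmem.mp h)),
        show dIns d c = d ++ [c] from by simp only [dIns, if_neg hd],
        show d.map (fun c => [c]) ++ [[c]] = (d ++ [c]).map (fun c => [c]) from by simp]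
      exact ih (d ++ [c])

-- ===== VERDICT (by name: the statement is the Claim_ definition above) =====
theorem ShortestNonSharedSubstring_spec : Claim_equal_ShortestNonSharedSubstring := by
  intro text1 text2 _
  simp only [Spec_ShortestNonSharedSubstring, ShortestNonSharedSubstring,
    ShortestNonSharedSubstring_alt]
  set l := text1.toList with hl
  set t2 := text2.toList with ht2
  set T := buildSuffixTrie l with hTdef
  have hT : TrieInv l l.length l.length T := build_inv l
  have hroot0 : strOf T 0 = [] := strOf_root T hT.len_pos hT.root_parent
  have hchild0 : ((T.getD 0 defNode).children.values).map (strOf T) =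
      (extFin l []).map (fun c => [c]) := by
    rw [childVals_map l T hT 0 hT.len_pos, hroot0]
    simp
  have hextnil : extFin l [] = l.foldl dIns [] := by
    unfold extFin
    simp only [List.take_zero, List.length_nil, Nat.sub_zero, decide_true, Nat.add_zero,
      List.filter_true]
    rw [map_getD_range]
  have hlevel0 : l.foldl (fun acc c => if [c] ∈ acc then acc else acc ++ [[c]]) [] =
      (l.foldl dIns []).map (fun c => [c]) := by
    have := level0_eq l []
    simpa using this
  set F := (l.length + 2) * (T.length + 1) with hFdef
  have hF : 1 ≤ F := Nat.mul_pos (by omega) (by have := hT.len_pos; omega)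
  obtain ⟨F', hF'⟩ : ∃ F', F = F' + 1 := ⟨F - 1, by omega⟩
  rw [hF']
  have hstep0 : bfsA T t2 (F' + 1) [0] = bfsA T t2 F' ((T.getD 0 defNode).children.values) := by
    rw [bfsA_cons]
    simp
  rw [hstep0]
  have hmul : (l.length + 2) * (T.length + 1) = (l.length + 1) * (T.length + 1) + (T.length + 1) :=
    Nat.succ_mul _ _
  have hmain := main_levels l t2 T hT l.length 1 ((T.getD 0 defNode).children.values) F'
    (by omega) (le_refl 1) (by omega)
    (by
      intro u hu
      obtain ⟨h0, hlt, hlen1, a, ha, hocc⟩ := childVals_mem l T hT 0 hT.len_pos u hu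
      have hlen1' : (strOf T u).length = 1 := by rw [hlen1, hroot0]; rfl
      exact ⟨h0, hlt, hlen1', a, by rw [← hlen1']; exact ha, by rw [← hlen1']; exact hocc⟩)
    (by
      rw [hchild0]
      exact (nodup_extFin l []).map (fun a b h => by simpa using h))
    (by rw [show l.length + 2 - 1 = l.length + 1 from by omega]; omega)
  rw [hmain, show l.length + 1 - 1 = l.length from by omega, hchild0, hextnil, ← hlevel0]
  cases hfold : (List.range' 1 l.length).foldl (altBody l t2)
      (.inr (l.foldl (fun acc c => if [c] ∈ acc then acc else acc ++ [[c]]) [])) with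
  | inl s => rfl
  | inr lvl => rfl
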